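-- pv_equiv track=rewrite | github.com/Peterelzevir/tools | invite_manager.py | _distribute_numbers
-- ===== SOURCE A (Python) =====
-- def _distribute_numbers(numbers, clients):
--     distribution = {}
--     total_numbers = len(numbers)
--     total_clients = len(clients)
--
--     base_count = total_numbers // total_clients
--     extra = total_numbers % total_clients
--
--     start = 0
--     for i, (_, phone) in enumerate(clients):
--         count = base_count + (1 if i < extra else 0)
--         end = start + count
--         distribution[phone] = numbers[start:end]
--         start = end
--
--     return distribution
-- ===== SOURCE B (Python) =====
-- def _distribute_numbers(numbers, clients):
--     # Self-similar greedy split: hand the next client the ceiling share of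
--     # what is left, then redistribute the remainder among the remaining clients.
--     distribution = {}
--     nums = numbers
--     remaining = len(clients)
--     for _, phone in clients:
--         count = -(-len(nums) // remaining)
--         distribution[phone] = nums[:count]
--         nums = nums[count:]
--         remaining -= 1
--     return distribution
-- ===== Notes on version B (the rewrite author's own statement) =====
-- stated objective: alternative
-- what changed: Replaced the precomputed base/extra remainder-spreading single pass by a self-similar greedy scheme: each client takes the ceiling share ceil(len(rest)/len(remaining clients)) of the not-yet-assigned suffix, recomputing the division on the shrinking problem instead of using base_count, extra and a running start index.
import Mathlib
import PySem

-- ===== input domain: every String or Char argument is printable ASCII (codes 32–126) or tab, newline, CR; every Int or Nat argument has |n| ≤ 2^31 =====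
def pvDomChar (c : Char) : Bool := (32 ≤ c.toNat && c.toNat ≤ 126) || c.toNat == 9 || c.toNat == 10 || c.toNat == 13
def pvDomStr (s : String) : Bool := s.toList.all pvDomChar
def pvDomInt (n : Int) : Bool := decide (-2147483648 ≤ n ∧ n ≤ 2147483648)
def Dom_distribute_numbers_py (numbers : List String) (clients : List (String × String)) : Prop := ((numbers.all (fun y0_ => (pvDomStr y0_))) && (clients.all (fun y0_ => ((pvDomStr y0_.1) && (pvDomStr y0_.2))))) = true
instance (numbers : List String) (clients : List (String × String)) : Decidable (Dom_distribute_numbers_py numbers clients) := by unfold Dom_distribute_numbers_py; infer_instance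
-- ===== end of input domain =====

-- B replaces A's precomputed base/extra + running-start pass by a self-similar
-- greedy split: each client takes ceil(|rest|/|remaining clients|) of the
-- unassigned suffix (alternative decomposition; same distribution proved equal).

-- ===== PORT A =====
-- loop body of A: state = (dict so far, running start)
def pvStepA (numbers : List String) (base extra : Int)
    (st : PySem.Dict String (List String) × Int) (p : Int × (String × String)) :
    PySem.Dict String (List String) × Int :=
  let count := base + (if p.1 < extra then 1 else 0)
  let e := st.2 + count
  (st.1.insert p.2.2 (PySem.List.slice numbers (some st.2) (some e)), e)

def distribute_numbers_py (numbers : List String) (clients : List (String × String)) : List (String × List String) :=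
  let total : Int := (numbers.length : Int)
  let tc : Int := (clients.length : Int)
  let base := PySem.Int.floordiv total tc
  let extra := PySem.Int.mod total tc
  (((PySem.List.enumerate clients 0).foldl (pvStepA numbers base extra)
      (PySem.Dict.empty, 0)).1).items

-- ===== PORT B =====
-- loop body of B: state = (dict, unassigned suffix nums, remaining client count);
-- count = -(-len(nums) // remaining)  (Python ceiling division)
def pvStepB (st : PySem.Dict String (List String) × List String × Int)
    (p : String × String) : PySem.Dict String (List String) × List String × Int :=
  let count := -(PySem.Int.floordiv (-((st.2.1.length : Int))) st.2.2)
  (st.1.insert p.2 (PySem.List.slice st.2.1 none (some count)),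
   PySem.List.slice st.2.1 (some count) none,
   st.2.2 - 1)

def distribute_numbers_py_alt (numbers : List String) (clients : List (String × String)) : List (String × List String) :=
  (clients.foldl pvStepB (PySem.Dict.empty, numbers, (clients.length : Int))).1.items

-- ===== PRECONDITION & SPEC =====
-- A raises ZeroDivisionError when clients is empty; exactly that input is excluded.
def Pre_distribute_numbers_py (numbers : List String) (clients : List (String × String)) : Prop := clients ≠ []
instance (numbers : List String) (clients : List (String × String)) : Decidable (Pre_distribute_numbers_py numbers clients) := by unfold Pre_distribute_numbers_py; infer_instance
def pvWitness_distribute_numbers_py : List String × (List (String × String)) := (["1", "2", "3"], [("a", "p1"), ("b", "p2")])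

def Spec_distribute_numbers_py (numbers : List String) (clients : List (String × String)) (out : List (String × List String)) : Prop := out = distribute_numbers_py_alt numbers clients
instance (numbers : List String) (clients : List (String × String)) (out : List (String × List String)) : Decidable (Spec_distribute_numbers_py numbers clients out) := by unfold Spec_distribute_numbers_py; infer_instance

-- ===== CLAIM (what is proved, stated in full; the proofs are below) =====
def Claim_equal_distribute_numbers_py : Prop := ∀ (numbers : List String) (clients : List (String × String)), Dom_distribute_numbers_py numbers clients → Pre_distribute_numbers_py numbers clients → Spec_distribute_numbers_py numbers clients (distribute_numbers_py numbers clients)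

-- ===== LEMMAS AND PROOFS =====

-- Invariant: at enumeration index k, A's running start is s = base*k + min k extra,
-- and B's state holds the suffix numbers.drop s with tc - k clients remaining;
-- then both folds build the same dict.  base/extra are abstracted into the four
-- facts the proof needs (n = base*tc + extra, 0 ≤ extra < tc, 0 ≤ base).
lemma fold_eq (numbers : List String) (base extra : Int) (tcN : Nat)
    (hb : base * (tcN : Int) + extra = (numbers.length : Int))
    (he0 : 0 ≤ extra) (helt : extra < (tcN : Int)) (hbase : 0 ≤ base) :
    ∀ (cs : List (String × String)) (k : Nat) (d : PySem.Dict String (List String)) (s : Int),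
    k + cs.length = tcN →
    s = base * (k : Int) + min (k : Int) extra →
    s ≤ (numbers.length : Int) →
    ((PySem.List.enumerate cs (k : Int)).foldl (pvStepA numbers base extra) (d, s)).1
      = (cs.foldl pvStepB (d, numbers.drop s.toNat, (tcN : Int) - (k : Int))).1 := by
  intro cs
  induction cs with
  | nil => intro k d s _ _ _; simp [PySem.List.enumerate_nil]
  | cons c cs' ih =>
    intro k d s hlen hs hsn
    have hk_lt : (k : Int) < (tcN : Int) := by
      have : k < tcN := by simp at hlen; omega
      exact_mod_cast this
    have hc : (0 : Int) < (tcN : Int) - (k : Int) := by omega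
    have hs0 : 0 ≤ s := by
      rw [hs]
      have h1 : 0 ≤ base * (k : Int) := mul_nonneg hbase (by positivity)
      have h2 : (0 : Int) ≤ min (k : Int) extra := le_min (by positivity) he0
      omega
    -- the two count values agree
    set countA : Int := base + (if (k : Int) < extra then 1 else 0) with hcA
    have hcA0 : 0 ≤ countA := by rw [hcA]; split_ifs <;> omega
    have hlen_drop : ((numbers.drop s.toNat).length : Int) = (numbers.length : Int) - s := by
      rw [List.length_drop]; omega
    have hrem_lo : (countA - 1) * ((tcN : Int) - (k : Int)) < (numbers.length : Int) - s := by
      by_cases hkx : (k : Int) < extra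
      · have hmin : min (k : Int) extra = (k : Int) := min_eq_left (le_of_lt hkx)
        have hrem : (numbers.length : Int) - s
            = base * ((tcN : Int) - (k : Int)) + (extra - (k : Int)) := by
          rw [hs, hmin, ← hb]; ring
        have : (countA - 1) * ((tcN : Int) - (k : Int)) = base * ((tcN : Int) - (k : Int)) := by
          rw [hcA, if_pos hkx]; ring
        omega
      · have hmin : min (k : Int) extra = extra := min_eq_right (by omega)
        have hrem : (numbers.length : Int) - s = base * ((tcN : Int) - (k : Int)) := by
          rw [hs, hmin, ← hb]; ring
        have : (countA - 1) * ((tcN : Int) - (k : Int))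
            = base * ((tcN : Int) - (k : Int)) - ((tcN : Int) - (k : Int)) := by
          rw [hcA, if_neg hkx]; ring
        omega
    have hrem_hi : (numbers.length : Int) - s ≤ countA * ((tcN : Int) - (k : Int)) := by
      by_cases hkx : (k : Int) < extra
      · have hmin : min (k : Int) extra = (k : Int) := min_eq_left (le_of_lt hkx)
        have hrem : (numbers.length : Int) - s
            = base * ((tcN : Int) - (k : Int)) + (extra - (k : Int)) := by
          rw [hs, hmin, ← hb]; ring
        have : countA * ((tcN : Int) - (k : Int))
            = base * ((tcN : Int) - (k : Int)) + ((tcN : Int) - (k : Int)) := by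
          rw [hcA, if_pos hkx]; ring
        omega
      · have hmin : min (k : Int) extra = extra := min_eq_right (by omega)
        have hrem : (numbers.length : Int) - s = base * ((tcN : Int) - (k : Int)) := by
          rw [hs, hmin, ← hb]; ring
        have : countA * ((tcN : Int) - (k : Int)) = base * ((tcN : Int) - (k : Int)) := by
          rw [hcA, if_neg hkx]; ring
        omega
    have hcount : -(PySem.Int.floordiv (-(((numbers.drop s.toNat).length : Int))) ((tcN : Int) - (k : Int))) = countA := by
      rw [hlen_drop, PySem.Int.neg_floordiv_neg_eq_iff_of_pos hc]
      exact ⟨hrem_lo, hrem_hi⟩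
    -- the next start stays within bounds
    have hen : s + countA ≤ (numbers.length : Int) := by
      rcases eq_or_lt_of_le hcA0 with h0 | h1
      · omega
      · have h2 : countA - 1 ≤ (countA - 1) * ((tcN : Int) - (k : Int)) := by
          calc countA - 1 = (countA - 1) * 1 := by ring
            _ ≤ (countA - 1) * ((tcN : Int) - (k : Int)) :=
              mul_le_mul_of_nonneg_left (by omega) (by omega)
        omega
    -- slice identities: A's chunk = B's chunk, A's new start suffix = B's new suffix
    have hsliceA : PySem.List.slice numbers (some s) (some (s + countA))
        = (numbers.drop s.toNat).take countA.toNat := by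
      rw [PySem.List.slice_toNat numbers hs0 (by omega)]
      congr 1; omega
    have hsliceB : PySem.List.slice (numbers.drop s.toNat) none (some countA)
        = (numbers.drop s.toNat).take countA.toNat := PySem.List.slice_to _ hcA0
    have hdropB : PySem.List.slice (numbers.drop s.toNat) (some countA) none
        = numbers.drop (s + countA).toNat := by
      rw [PySem.List.slice_from _ hcA0, List.drop_drop]
      congr 1; omega
    -- the next start in closed form
    have hnext : s + countA = base * ((k : Int) + 1) + min ((k : Int) + 1) extra := by
      by_cases hkx : (k : Int) < extra
      · have hmin : min (k : Int) extra = (k : Int) := min_eq_left (le_of_lt hkx)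
        have hmin' : min ((k : Int) + 1) extra = (k : Int) + 1 := min_eq_left (by omega)
        have hrw : base * ((k : Int) + 1) = base * (k : Int) + base := by ring
        rw [hs, hmin, hmin', hcA, if_pos hkx]; omega
      · have hmin : min (k : Int) extra = extra := min_eq_right (by omega)
        have hmin' : min ((k : Int) + 1) extra = extra := min_eq_right (by omega)
        have hrw : base * ((k : Int) + 1) = base * (k : Int) + base := by ring
        rw [hs, hmin, hmin', hcA, if_neg hkx]; omega
    -- unfold one step of each fold
    rw [PySem.List.enumerate_cons, List.foldl_cons, List.foldl_cons]
    show ((PySem.List.enumerate cs' ((k : Int) + 1)).foldl (pvStepA numbers base extra)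
        (pvStepA numbers base extra (d, s) ((k : Int), c))).1
      = (cs'.foldl pvStepB (pvStepB (d, numbers.drop s.toNat, (tcN : Int) - (k : Int)) c)).1
    have hstepA : pvStepA numbers base extra (d, s) ((k : Int), c)
        = (d.insert c.2 ((numbers.drop s.toNat).take countA.toNat), s + countA) := by
      simp only [pvStepA]
      rw [← hcA, hsliceA]
    have hstepB : pvStepB (d, numbers.drop s.toNat, (tcN : Int) - (k : Int)) c
        = (d.insert c.2 ((numbers.drop s.toNat).take countA.toNat),
           numbers.drop (s + countA).toNat, (tcN : Int) - (k : Int) - 1) := by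
      simp only [pvStepB, hcount, hsliceB, hdropB]
    rw [hstepA, hstepB]
    have hcast : ((k : Int) + 1) = (((k + 1 : Nat)) : Int) := by push_cast; ring
    have htc' : (tcN : Int) - (k : Int) - 1 = (tcN : Int) - ((k + 1 : Nat) : Int) := by
      push_cast; ring
    rw [hcast, htc']
    exact ih (k + 1) _ (s + countA) (by simp at hlen ⊢; omega)
      (by rw [hnext, hcast]) hen

-- ===== VERDICT (by name: the statement is the Claim_ definition above) =====
theorem distribute_numbers_py_spec : Claim_equal_distribute_numbers_py := by
  intro numbers clients _ hpre
  unfold Spec_distribute_numbers_py distribute_numbers_py distribute_numbers_py_alt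
  simp only
  have htc : 0 < clients.length := by
    cases clients with
    | nil => exact absurd rfl hpre
    | cons c cs => simp
  have hpos : (0 : Int) < (clients.length : Int) := by exact_mod_cast htc
  refine congrArg PySem.Dict.items ?_
  have h := fold_eq numbers
      (PySem.Int.floordiv (numbers.length : Int) (clients.length : Int))
      (PySem.Int.mod (numbers.length : Int) (clients.length : Int))
      clients.length
      (PySem.Int.floordiv_mul_add_mod _ _)
      (PySem.Int.mod_nonneg _ hpos)
      (PySem.Int.mod_lt _ hpos)
      (by
        rw [PySem.Int.floordiv_eq_ediv_of_pos hpos]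
        exact Int.ediv_nonneg (by positivity) (le_of_lt hpos))
      clients 0 PySem.Dict.empty 0
      (by simp)
      (by
        push_cast
        rw [min_eq_left (PySem.Int.mod_nonneg _ hpos)]; ring)
      (by positivity)
  simpa using h
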